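/- GENERATED by farm/mkstatement.py from design/units.tsv (unit `compute_codewords.8`) and the assertions of Vorbis/Spec/Codebook/Codewords.lean — do not edit.
   THE STATEMENT of the proof unit `compute_codewords.8`: segment 8 of `compute_codewords` (20 instructions; entries 0x1082ee;
   exits 0x108345,0x108373; ranges 0x1082ee-0x108341)
   takes each of its entry assertions to one of its exit assertions (`Vorbis.Spec.compute_codewords.Seg8`), given the contracts of its callees.
   What the names mean: Vorbis/Spec/Basic.lean (the shared hypotheses), Vorbis/Spec/Codebook/Codewords.lean (the assertions). The theorem to prove:
   `theorem compute_codewords_8_ok : Vorbis.Spec.compute_codewords_8.Statement`. -/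
import Vorbis.Spec.Codebook
import Vorbis.Spec.Codebook.Codewords
import Vorbis.Spec.Leaves2
namespace Vorbis.Spec.compute_codewords_8
open X86 X86.User Asan

/-- The statement of unit `compute_codewords.8`. -/
def Statement : Prop :=
  ∀ (Lay : Layout) (_hLay : Lay.hi = 0x1000000) (μ : Microarch) (_hμ : UserX.MicroOK μ) (u₀ : State)
    (_hcode : HasCodeNat Lay u₀ Vorbis.L.compute_codewords.entry Vorbis.Code.code_compute_codewords.nat Vorbis.L.compute_codewords.size)
    (_h_add_entry : ∀ (others : List Obj) (frames : List (Nat × FrameLayout)), Calls Lay μ Vorbis.WayInv (Vorbis.conv u₀) Vorbis.L.add_entry.entry (Vorbis.Spec.add_entry.spec others frames))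
    (_h_asan_load4_noabort : Asan.SmallCheck Lay μ Vorbis.WayInv (Vorbis.CodeOK u₀) [.rax, .rcx, .rdx] 4 Vorbis.L.__asan_load4_noabort.entry)
    (_h_bit_reverse : ∀ (others : List Obj) (frames : List (Nat × FrameLayout)), Calls Lay μ Vorbis.WayInv (Vorbis.conv u₀) Vorbis.L.bit_reverse.entry (Vorbis.Spec.bit_reverse.spec others frames)),
    Vorbis.Spec.compute_codewords.Seg8 Lay μ u₀

end Vorbis.Spec.compute_codewords_8
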